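-- pv_equiv track=rewrite | github.com/Pabitha99/task--7 | task-7b.py | count_and_type_breweries_by_state
-- ===== SOURCE A (Python) =====
-- def count_and_type_breweries_by_state(brewery_data, states):
--     state_breweries = {}
--     for brewery in brewery_data:
--         state = brewery.get('state', 'Unknown')
--         if state in states:
--             brewery_type = brewery.get('brewery_type', 'Unknown')
--             if state not in state_breweries:
--                 state_breweries[state] = {brewery_type: 1}
--             else:
--                 if brewery_type not in state_breweries[state]:
--                     state_breweries[state][brewery_type] = 1
--                 else:
--                     state_breweries[state][brewery_type] += 1
--     return state_breweries
-- ===== SOURCE B (Python) =====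
-- def count_and_type_breweries_by_state(brewery_data, states):
--     # Two-phase nested scan: filter once, then for each first-seen state count
--     # its types with a full pass over the filtered list.
--     selected = [b for b in brewery_data if b.get('state', 'Unknown') in states]
--     result = {}
--     for b in selected:
--         s = b.get('state', 'Unknown')
--         if s not in result:
--             counts = {}
--             for b2 in selected:
--                 if b2.get('state', 'Unknown') == s:
--                     t = b2.get('brewery_type', 'Unknown')
--                     counts[t] = counts.get(t, 0) + 1
--             result[s] = counts
--     return result
-- ===== Notes on version B (the rewrite author's own statement) =====
-- stated objective: alternative
-- what changed: Replaces the single incremental pass that mutates a nested dict with a two-phase nested scan: filter the breweries once, then for each first-seen state recount its brewery types with a full pass over the filtered list.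
import Mathlib
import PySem

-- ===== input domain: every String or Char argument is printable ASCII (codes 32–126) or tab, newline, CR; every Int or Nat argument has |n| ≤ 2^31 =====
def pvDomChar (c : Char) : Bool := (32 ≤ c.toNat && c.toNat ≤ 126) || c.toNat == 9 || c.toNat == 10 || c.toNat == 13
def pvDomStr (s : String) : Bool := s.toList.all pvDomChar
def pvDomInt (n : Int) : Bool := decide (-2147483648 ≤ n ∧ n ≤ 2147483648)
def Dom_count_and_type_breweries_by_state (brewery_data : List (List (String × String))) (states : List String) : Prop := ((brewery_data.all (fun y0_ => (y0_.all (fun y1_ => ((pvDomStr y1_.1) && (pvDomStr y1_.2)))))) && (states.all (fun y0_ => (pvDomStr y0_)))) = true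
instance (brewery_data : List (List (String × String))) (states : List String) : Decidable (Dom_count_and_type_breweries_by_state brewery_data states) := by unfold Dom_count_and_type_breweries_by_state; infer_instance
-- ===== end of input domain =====

-- B replaces A's single incremental pass over a mutable nested dict by a two-phase
-- nested scan (filter once, then recount each first-seen state); objective: alternative
-- structure, same return value.

-- ===== PORT A =====
def count_and_type_breweries_by_state (brewery_data : List (List (String × String))) (states : List String) : List (String × List (String × Int)) :=
  let state_breweries : PySem.Dict String (PySem.Dict String Int) :=
    brewery_data.foldl (fun state_breweries brewery =>
      let state := (PySem.Dict.mk brewery).getD "state" "Unknown"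
      if states.contains state then
        let brewery_type := (PySem.Dict.mk brewery).getD "brewery_type" "Unknown"
        if state_breweries.contains state = false then
          state_breweries.insert state (PySem.Dict.ofList [(brewery_type, (1 : Int))])
        else
          let inner := state_breweries.getD state PySem.Dict.empty
          if inner.contains brewery_type = false then
            state_breweries.insert state (inner.insert brewery_type 1)
          else
            state_breweries.insert state (inner.insert brewery_type (inner.getD brewery_type 0 + 1))
      else state_breweries) PySem.Dict.empty
  state_breweries.items.map (fun p => (p.1, p.2.items))

-- ===== PORT B =====
def count_and_type_breweries_by_state_alt (brewery_data : List (List (String × String))) (states : List String) : List (String × List (String × Int)) :=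
  let selected := brewery_data.filter (fun b => states.contains ((PySem.Dict.mk b).getD "state" "Unknown"))
  let result : PySem.Dict String (PySem.Dict String Int) :=
    selected.foldl (fun result b =>
      let s := (PySem.Dict.mk b).getD "state" "Unknown"
      if result.contains s = false then
        let counts : PySem.Dict String Int :=
          selected.foldl (fun counts b2 =>
            if ((PySem.Dict.mk b2).getD "state" "Unknown") == s then
              let t := (PySem.Dict.mk b2).getD "brewery_type" "Unknown"
              counts.insert t (counts.getD t 0 + 1)
            else counts) PySem.Dict.empty
        result.insert s counts
      else result) PySem.Dict.empty
  result.items.map (fun p => (p.1, p.2.items))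

-- ===== PRECONDITION & SPEC =====
def Spec_count_and_type_breweries_by_state (brewery_data : List (List (String × String))) (states : List String) (out : List (String × List (String × Int))) : Prop := out = count_and_type_breweries_by_state_alt brewery_data states
instance (brewery_data : List (List (String × String))) (states : List String) (out : List (String × List (String × Int))) : Decidable (Spec_count_and_type_breweries_by_state brewery_data states out) := by unfold Spec_count_and_type_breweries_by_state; infer_instance

-- ===== CLAIM (what is proved, stated in full; the proofs are below) =====
def Claim_equal_count_and_type_breweries_by_state : Prop := ∀ (brewery_data : List (List (String × String))) (states : List String), Dom_count_and_type_breweries_by_state brewery_data states → Spec_count_and_type_breweries_by_state brewery_data states (count_and_type_breweries_by_state brewery_data states)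

-- ===== LEMMAS AND PROOFS =====

-- b.get('state', 'Unknown') and b.get('brewery_type', 'Unknown'), named for the proofs
def stOf (b : List (String × String)) : String := (PySem.Dict.mk b).getD "state" "Unknown"
def tyOf (b : List (String × String)) : String := (PySem.Dict.mk b).getD "brewery_type" "Unknown"

-- the filtered list B starts from
def selOf (states : List String) (bd : List (List (String × String))) : List (List (String × String)) :=
  bd.filter (fun b => states.contains (stOf b))

-- brewery types of the selected breweries in state s, in order
def typesIn (sel : List (List (String × String))) (s : String) : List String :=
  (sel.filter (fun b => stOf b == s)).map tyOf

-- B's inner counting loop, named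
def countsOf (sel : List (List (String × String))) (s : String) : PySem.Dict String Int :=
  sel.foldl (fun counts b2 =>
    if stOf b2 == s then counts.insert (tyOf b2) (counts.getD (tyOf b2) 0 + 1) else counts)
    PySem.Dict.empty

-- A's loop body, named
def aStep (states : List String) (sb : PySem.Dict String (PySem.Dict String Int))
    (brewery : List (String × String)) : PySem.Dict String (PySem.Dict String Int) :=
  if states.contains (stOf brewery) then
    if sb.contains (stOf brewery) = false then
      sb.insert (stOf brewery) (PySem.Dict.ofList [(tyOf brewery, (1 : Int))])
    else
      let inner := sb.getD (stOf brewery) PySem.Dict.empty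
      if inner.contains (tyOf brewery) = false then
        sb.insert (stOf brewery) (inner.insert (tyOf brewery) 1)
      else
        sb.insert (stOf brewery) (inner.insert (tyOf brewery) (inner.getD (tyOf brewery) 0 + 1))
  else sb

lemma a_unfold (bd : List (List (String × String))) (states : List String) :
    count_and_type_breweries_by_state bd states
      = (bd.foldl (aStep states) PySem.Dict.empty).items.map (fun p => (p.1, p.2.items)) := rfl

lemma b_unfold (bd : List (List (String × String))) (states : List String) :
    count_and_type_breweries_by_state_alt bd states
      = ((selOf states bd).foldl
          (fun r b => if r.contains (stOf b) = false
                      then r.insert (stOf b) (countsOf (selOf states bd) (stOf b)) else r)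
          PySem.Dict.empty).items.map (fun p => (p.1, p.2.items)) := rfl

lemma countsOf_eq_counter (sel : List (List (String × String))) (s : String) :
    countsOf sel s = PySem.Dict.counter (typesIn sel s) := by
  rw [← PySem.Dict.foldl_insert_getD_add_one_eq_counter]
  unfold typesIn countsOf
  rw [List.foldl_map, List.foldl_filter]

-- the states a left-to-right pass appends beyond the already-seen key list `seen`
def news (seen : List String) : List String → List String
  | [] => []
  | s :: rest => if seen.contains s then news seen rest else s :: news (seen ++ [s]) rest

lemma news_spec (l seen : List String) : seen ++ news seen l = PySem.Set.update seen l := by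
  induction l generalizing seen with
  | nil => simp [news, PySem.Set.update]
  | cons s rest ih =>
    show seen ++ news seen (s :: rest) = (s :: rest).foldl PySem.Set.add seen
    rw [List.foldl_cons]
    cases hc : seen.contains s with
    | true =>
      have hadd : PySem.Set.add seen s = seen := by
        simp only [PySem.Set.add, PySem.Set.contains, hc, if_true]
      simp only [news, hc, if_true, hadd]
      exact ih seen
    | false =>
      have hadd : PySem.Set.add seen s = seen ++ [s] := by
        simp only [PySem.Set.add, PySem.Set.contains, hc, Bool.false_eq_true, if_false]
      simp only [news, hc, Bool.false_eq_true, if_false, hadd]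
      have hih := ih (seen ++ [s])
      rw [show PySem.Set.update (seen ++ [s]) rest
            = List.foldl PySem.Set.add (seen ++ [s]) rest from rfl] at hih
      rw [← hih]
      simp

lemma news_nil (l : List String) : news [] l = PySem.Set.ofList l := by
  have := news_spec l []
  simpa [PySem.Set.update, PySem.Set.ofList] using this

-- B's outer loop, characterized
lemma b_loop (sel : List (List (String × String))) (l : List (List (String × String)))
    (acc : PySem.Dict String (PySem.Dict String Int)) :
    (l.foldl (fun r b => if r.contains (stOf b) = false
                         then r.insert (stOf b) (countsOf sel (stOf b)) else r) acc).items
      = acc.items ++ (news acc.keys (l.map stOf)).map (fun s => (s, countsOf sel s)) := by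
  induction l generalizing acc with
  | nil => simp [news]
  | cons b rest ih =>
    simp only [List.foldl_cons, List.map_cons]
    cases h : acc.contains (stOf b) with
    | true =>
      have hk : acc.keys.contains (stOf b) = true := by
        rw [List.contains_iff_mem, ← PySem.Dict.contains_iff_mem_keys]; exact h
      rw [if_neg (by simp), ih acc]
      simp only [news, hk, if_true]
    | false =>
      have hk : acc.keys.contains (stOf b) = false := by
        rw [Bool.eq_false_iff]
        intro hc
        rw [List.contains_iff_mem, ← PySem.Dict.contains_iff_mem_keys] at hc
        rw [hc] at h; cases h
      rw [if_pos rfl, ih]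
      rw [PySem.Dict.items_insert_of_not_contains _ _ h,
          PySem.Dict.keys_insert_of_not_contains _ _ h]
      simp only [news, hk, Bool.false_eq_true, if_false, List.map_cons, List.append_assoc,
        List.singleton_append]

-- keys of a dict whose items are a map over a state list
lemma keys_of_items_map (D : PySem.Dict String (PySem.Dict String Int)) (L : List String)
    (f : String → PySem.Dict String Int) (hI : D.items = L.map (fun s => (s, f s))) :
    D.keys = L := by
  simp [PySem.Dict.keys, hI, List.map_map, Function.comp_def]

lemma typesIn_append (sel : List (List (String × String))) (x : List (String × String)) (s : String) :
    typesIn (sel ++ [x]) s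
      = typesIn sel s ++ (if stOf x == s then [tyOf x] else []) := by
  unfold typesIn
  rw [List.filter_append]
  by_cases h : stOf x == s <;> simp [h]

-- A's loop, characterized: after the whole pass the dict's items list is the
-- first-occurrence list of selected states, each paired with the counter of its types.
lemma a_char (states : List String) (bd : List (List (String × String))) :
    (bd.foldl (aStep states) PySem.Dict.empty).items
      = (PySem.Set.ofList ((selOf states bd).map stOf)).map
          (fun s => (s, PySem.Dict.counter (typesIn (selOf states bd) s))) := by
  induction bd using List.reverseRecOn with
  | nil => rfl
  | append_singleton bd x ih =>
    rw [List.foldl_append, List.foldl_cons, List.foldl_nil]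
    cases hx : states.contains (stOf x) with
    | false =>
      have hx' : stOf x ∉ states := fun hm =>
        Bool.false_ne_true (hx ▸ List.contains_iff_mem.mpr hm)
      have hsel : selOf states (bd ++ [x]) = selOf states bd := by
        simp [selOf, List.filter_append, hx']
      rw [hsel, show aStep states (bd.foldl (aStep states) PySem.Dict.empty) x
            = bd.foldl (aStep states) PySem.Dict.empty from by
          unfold aStep; rw [if_neg (by simp [hx'])]]
      exact ih
    | true =>
      have hx' : stOf x ∈ states := List.contains_iff_mem.mp hx
      have hsel : selOf states (bd ++ [x]) = selOf states bd ++ [x] := by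
        simp [selOf, List.filter_append, hx']
      set D := bd.foldl (aStep states) PySem.Dict.empty with hD
      set sel := selOf states bd with hselbd
      set L := PySem.Set.ofList (sel.map stOf) with hL
      have hkeys : D.keys = L := keys_of_items_map D L _ ih
      have hnd : D.keys.Nodup := by rw [hkeys, hL]; exact PySem.Set.nodup_ofList _
      have hmemL : ∀ s', s' ∈ L ↔ s' ∈ sel.map stOf := fun s' => by
        rw [hL]; exact PySem.Set.mem_ofList ..
      have hLapp : PySem.Set.ofList ((sel ++ [x]).map stOf) = PySem.Set.add L (stOf x) := by
        rw [List.map_append]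
        show (sel.map stOf ++ [stOf x]).foldl PySem.Set.add [] = _
        rw [List.foldl_append]
        rfl
      have hmod : ∀ (c : PySem.Dict String Int) (t : String),
          c.modify t 0 (· + 1) = c.insert t (c.getD t 0 + 1) := fun _ _ => rfl
      by_cases hs : stOf x ∈ sel.map stOf
      · -- the state was seen before: the entry is updated in place
        have hsL : stOf x ∈ L := (hmemL _).mpr hs
        have hcont : D.contains (stOf x) = true := by
          rw [PySem.Dict.contains_eq_decide_mem_keys, hkeys]; simpa using hsL
        have hinner : D.getD (stOf x) PySem.Dict.empty
            = PySem.Dict.counter (typesIn sel (stOf x)) := by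
          refine PySem.Dict.getD_of_mem_items D ?_ hnd _
          rw [ih]
          exact List.mem_map.mpr ⟨stOf x, hsL, rfl⟩
        have hstep : aStep states D x
            = D.insert (stOf x)
                (PySem.Dict.counter (typesIn sel (stOf x) ++ [tyOf x])) := by
          unfold aStep
          rw [if_pos hx, if_neg (by simp [hcont])]
          simp only [hinner, PySem.Dict.counter_append_singleton, hmod]
          cases ht : (PySem.Dict.counter (typesIn sel (stOf x))).contains (tyOf x) with
          | false =>
            rw [if_pos rfl, PySem.Dict.getD_of_not_contains _ _ ht]
            norm_num
          | true => rw [if_neg (by simp)]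
        have haddL : PySem.Set.add L (stOf x) = L := by
          have : L.contains (stOf x) = true := List.contains_iff_mem.mpr hsL
          simp only [PySem.Set.add, this, if_true]
        rw [hstep, hsel, hLapp, haddL,
            PySem.Dict.items_insert_of_contains _ _ hcont, ih, List.map_map]
        refine List.map_congr_left ?_
        intro s' _
        by_cases hss : s' = stOf x
        · subst hss; simp [typesIn_append]
        · have h2 : (stOf x == s') = false := by simpa using (Ne.symm hss)
          simp [hss, h2, typesIn_append]
      · -- a brand-new state: the entry is appended
        have hsL : stOf x ∉ L := fun h => hs ((hmemL _).mp h)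
        have hcont : D.contains (stOf x) = false := by
          rw [PySem.Dict.contains_eq_decide_mem_keys, hkeys]; simpa using hsL
        have hstep : aStep states D x
            = D.insert (stOf x) (PySem.Dict.ofList [(tyOf x, (1 : Int))]) := by
          unfold aStep
          rw [if_pos hx, if_pos (by rw [hcont])]
        have htynil : typesIn sel (stOf x) = [] := by
          unfold typesIn
          rw [List.filter_eq_nil_iff.mpr, List.map_nil]
          intro b hb hbeq
          exact hs (List.mem_map.mpr ⟨b, hb, by simpa using hbeq⟩)
        have haddL : PySem.Set.add L (stOf x) = L ++ [stOf x] := by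
          have : L.contains (stOf x) = false := by
            rw [Bool.eq_false_iff]; intro hc; exact hsL (List.contains_iff_mem.mp hc)
          simp only [PySem.Set.add, this, Bool.false_eq_true, if_false]
        rw [hstep, hsel, hLapp, haddL,
            PySem.Dict.items_insert_of_not_contains _ _ hcont, ih, List.map_append]
        congr 1
        · refine List.map_congr_left ?_
          intro s' hs'
          have hne : (stOf x == s') = false := by
            have : s' ≠ stOf x := fun h => hsL (h ▸ hs')
            simpa using (Ne.symm this)
          simp [typesIn_append, hne]
        · have : typesIn (sel ++ [x]) (stOf x) = [tyOf x] := by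
            rw [typesIn_append, htynil]
            simp
          simp only [List.map_cons, List.map_nil, this]
          rfl

-- ===== VERDICT (by name: the statement is the Claim_ definition above) =====
theorem count_and_type_breweries_by_state_spec : Claim_equal_count_and_type_breweries_by_state := by
  unfold Claim_equal_count_and_type_breweries_by_state
  intro bd states _
  show count_and_type_breweries_by_state bd states = count_and_type_breweries_by_state_alt bd states
  rw [a_unfold, b_unfold, a_char, b_loop]
  have he : (PySem.Dict.empty : PySem.Dict String (PySem.Dict String Int)).items = [] := rfl
  have hk : (PySem.Dict.empty : PySem.Dict String (PySem.Dict String Int)).keys = [] := rfl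
  rw [he, hk, news_nil, List.nil_append, List.map_map, List.map_map]
  refine List.map_congr_left ?_
  intro s _
  simp [countsOf_eq_counter]
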